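-- pv_equiv track=rewrite | github.com/fazli1702/H2-Computing | A level preparation/Data Validation/A2017_P1Q2.py | CalCheckDigit
-- ===== SOURCE A (Python) =====
-- def CalCheckDigit(Number, Total):
--     if len(Number) > 1:
--         Digit = int(Number[0])
--         Total += (Digit * (len(Number)+1))
--         NewNumber = Number[1:]
--         CheckDigit = CalCheckDigit(NewNumber, Total)
--     else:
--         Digit = int(Number[0])
--         Total += (Digit * (len(Number)+1))
--         CalcModulus = Total % 11
--         CheckValue = 11 - CalcModulus
--
--         if CheckValue == 11:
--             return str(0)
--         elif CheckValue == 10: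
--             return 'X'
--         else:
--             return str(CheckValue)
--
--     if len(Number) == 9:
--         return Number + CheckDigit
--     else:
--         return CheckDigit
-- ===== SOURCE B (Python) =====
-- def CalCheckDigit(Number, Total):
--     n = len(Number)
--     total = Total
--     w = n + 1
--     for ch in Number:
--         total += int(ch) * w
--         w -= 1
--     check = 11 - total % 11
--     s = '0' if check == 11 else ('X' if check == 10 else str(check))
--     return s if n < 9 else Number[-9:] + s
-- ===== Notes on version B (the rewrite author's own statement) =====
-- stated objective: simpler
-- what changed: Replaces A's recursion (one frame per digit, re-checking length and splicing the length-9 suffix on unwind) by a single iterative weighted-sum loop, a closed-form check-digit mapping, and direct assembly via Number[-9:].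
import Mathlib
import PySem

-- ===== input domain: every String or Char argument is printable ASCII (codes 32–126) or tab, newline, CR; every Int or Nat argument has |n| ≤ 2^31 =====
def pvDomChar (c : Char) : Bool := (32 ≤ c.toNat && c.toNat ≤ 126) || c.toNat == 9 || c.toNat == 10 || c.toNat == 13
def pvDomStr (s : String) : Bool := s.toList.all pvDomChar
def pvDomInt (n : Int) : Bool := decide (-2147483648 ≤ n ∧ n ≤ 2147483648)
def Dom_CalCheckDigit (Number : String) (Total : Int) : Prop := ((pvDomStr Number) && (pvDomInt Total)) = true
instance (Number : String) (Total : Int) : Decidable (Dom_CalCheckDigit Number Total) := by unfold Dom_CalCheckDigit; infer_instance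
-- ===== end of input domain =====

-- B replaces A's per-digit recursion (re-slicing the string each call) by one iterative weighted-sum loop plus direct assembly (simpler).


-- ===== PORT A =====
-- Recursive port of A over the character list; [] is Python's IndexError case (outside Pre_).
def CalCheckDigitAuxA : List Char → Int → List Char
  | [], _Total => []  -- int(Number[0]) raises IndexError; excluded by Pre_
  | c :: rest, Total =>
    let Digit := (PySem.Int.ofChars? [c]).getD 0   -- int(Number[0]); ValueError excluded by Pre_
    let Total' := Total + Digit * (((c :: rest).length : Int) + 1)
    if (c :: rest).length > 1 then
      -- NewNumber = Number[1:] = rest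
      let CheckDigit := CalCheckDigitAuxA rest Total'
      if (c :: rest).length = 9 then (c :: rest) ++ CheckDigit else CheckDigit
    else
      let CalcModulus := PySem.Int.mod Total' 11
      let CheckValue := 11 - CalcModulus
      if CheckValue = 11 then PySem.Int.toChars 0
      else if CheckValue = 10 then ['X']
      else PySem.Int.toChars CheckValue

def CalCheckDigit (Number : String) (Total : Int) : String :=
  String.ofList (CalCheckDigitAuxA Number.toList Total)

-- ===== PORT B =====
-- B's loop: state (total, w), w counts down from n+1.
def CalCheckDigitLoopB : List Char → Int × Int → Int × Int
  | [], st => st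
  | c :: rest, (total, w) =>
    CalCheckDigitLoopB rest (total + (PySem.Int.ofChars? [c]).getD 0 * w, w - 1)

def CalCheckDigit_alt (Number : String) (Total : Int) : String :=
  let cs := Number.toList
  let n : Int := cs.length
  let total := (CalCheckDigitLoopB cs (Total, n + 1)).1
  let check := 11 - PySem.Int.mod total 11
  let s : List Char := if check = 11 then ['0'] else if check = 10 then ['X'] else PySem.Int.toChars check
  if n < 9 then String.ofList s
  else String.ofList (PySem.List.slice cs (some (-9)) none ++ s)  -- Number[-9:] + s

-- ===== PRECONDITION & SPEC =====
-- Pre_ excludes exactly the inputs on which Python A raises: the empty string (IndexError)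
-- and strings with a non-digit character (ValueError from int()).
def Pre_CalCheckDigit (Number : String) (Total : Int) : Prop :=
  Number.toList ≠ [] ∧ Number.toList.all (fun c => c.isDigit) = true
instance (Number : String) (Total : Int) : Decidable (Pre_CalCheckDigit Number Total) := by
  unfold Pre_CalCheckDigit; infer_instance
def pvWitness_CalCheckDigit : String × Int := ("123456789", 0)

def Spec_CalCheckDigit (Number : String) (Total : Int) (out : String) : Prop := out = CalCheckDigit_alt Number Total
instance (Number : String) (Total : Int) (out : String) : Decidable (Spec_CalCheckDigit Number Total out) := by unfold Spec_CalCheckDigit; infer_instance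

-- ===== CLAIM (what is proved, stated in full; the proofs are below) =====
def Claim_equal_CalCheckDigit : Prop := ∀ (Number : String) (Total : Int), Dom_CalCheckDigit Number Total → Pre_CalCheckDigit Number Total → Spec_CalCheckDigit Number Total (CalCheckDigit Number Total)
-- ===== LEMMAS AND PROOFS =====

-- weighted digit sum: first char of a list of length m gets weight m+1, down to 2 for the last
def pvWSum : List Char → Int
  | [] => 0
  | c :: rest => (PySem.Int.ofChars? [c]).getD 0 * ((rest.length : Int) + 2) + pvWSum rest

-- the check string as a function of the final total
def pvCheckChars (t : Int) : List Char :=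
  if 11 - PySem.Int.mod t 11 = 11 then ['0']
  else if 11 - PySem.Int.mod t 11 = 10 then ['X']
  else PySem.Int.toChars (11 - PySem.Int.mod t 11)

lemma loopB_eq (cs : List Char) : ∀ total : Int,
    CalCheckDigitLoopB cs (total, (cs.length : Int) + 1) = (total + pvWSum cs, 1) := by
  induction cs with
  | nil => intro total; simp [CalCheckDigitLoopB, pvWSum]
  | cons c rest ih =>
    intro total
    have h1 : ((((c :: rest).length : Int) + 1) - 1) = (rest.length : Int) + 1 := by
      simp only [List.length_cons]; push_cast; ring
    simp only [CalCheckDigitLoopB]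
    rw [h1, ih]
    simp [pvWSum]; ring

lemma checkA_eq (t t' : Int) (h : t = t') :
    (if 11 - PySem.Int.mod t 11 = 11 then PySem.Int.toChars 0
     else if 11 - PySem.Int.mod t 11 = 10 then ['X']
     else PySem.Int.toChars (11 - PySem.Int.mod t 11)) = pvCheckChars t' := by
  subst h; unfold pvCheckChars; split_ifs <;> first | decide | rfl

lemma auxA_eq (cs : List Char) : ∀ Total : Int, cs ≠ [] →
    CalCheckDigitAuxA cs Total =
      (if 9 ≤ cs.length then cs.drop (cs.length - 9) else []) ++ pvCheckChars (Total + pvWSum cs) := by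
  induction cs with
  | nil => intro _ h; exact absurd rfl h
  | cons c rest ih =>
    intro Total _
    rw [CalCheckDigitAuxA]
    cases rest with
    | nil =>
      rw [if_neg (by simp : ¬ ([c] : List Char).length > 1),
          if_neg (by simp : ¬ 9 ≤ ([c] : List Char).length), List.nil_append]
      exact checkA_eq _ _ (by simp [pvWSum])
    | cons d rest' =>
      have hne : (d :: rest') ≠ ([] : List Char) := by simp
      rw [if_pos (by simp : (c :: d :: rest').length > 1), ih _ hne]
      have hws : Total + (PySem.Int.ofChars? [c]).getD 0 * (((c :: d :: rest').length : Int) + 1)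
            + pvWSum (d :: rest') = Total + pvWSum (c :: d :: rest') := by
        simp [pvWSum]; ring
      rw [hws]
      by_cases h9 : (c :: d :: rest').length = 9
      · have h8 : ¬ 9 ≤ (d :: rest').length := by simp only [List.length_cons] at *; omega
        rw [if_pos h9, if_neg h8, if_pos (by omega : 9 ≤ (c :: d :: rest').length),
            List.nil_append, h9]
        simp
      · rw [if_neg h9]
        by_cases hge : 9 ≤ (d :: rest').length
        · rw [if_pos hge, if_pos (by simp only [List.length_cons] at *; omega : 9 ≤ (c :: d :: rest').length)]
          have hd : (c :: d :: rest').length - 9 = ((d :: rest').length - 9) + 1 := by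
            simp only [List.length_cons] at *; omega
          rw [hd, List.drop_succ_cons]
        · rw [if_neg hge, if_neg (by simp only [List.length_cons] at *; omega : ¬ 9 ≤ (c :: d :: rest').length)]

lemma altB_eq (Number : String) (Total : Int) :
    CalCheckDigit_alt Number Total =
      String.ofList ((if 9 ≤ Number.toList.length then Number.toList.drop (Number.toList.length - 9) else [])
        ++ pvCheckChars (Total + pvWSum Number.toList)) := by
  unfold CalCheckDigit_alt
  simp only [loopB_eq]
  rw [PySem.List.slice_from_neg_ofNat Number.toList 9 (by omega)]
  by_cases h : 9 ≤ Number.toList.length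
  · rw [if_neg (by exact_mod_cast (by omega : ¬ ((Number.toList.length : Int) < 9))), if_pos h]
    simp [pvCheckChars]
  · rw [if_pos (by exact_mod_cast (by omega : (Number.toList.length : Int) < 9)), if_neg h]
    simp [pvCheckChars]

-- ===== VERDICT (by name: the statement is the Claim_ definition above) =====
theorem CalCheckDigit_spec : Claim_equal_CalCheckDigit := by
  intro Number Total _hDom hPre
  unfold Spec_CalCheckDigit
  rw [altB_eq]
  unfold CalCheckDigit
  rw [auxA_eq Number.toList Total hPre.1]
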